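-- pv_equiv track=rewrite | github.com/zeyu-chen/25t1-comp9021-labs | Lab 5/Solutions/ex_3_sol.py | f3_2
-- ===== SOURCE A (Python) =====
-- def f3_2(L: list[list[list[int]]], n: int) -> tuple[list[list[int]], list[list[int]]]:
--     """
--     Processes a 3-level nested list structure based on specific conditions.
--
--     Returns a pair of lists of lists:
--     1. First list: For each L' in L with length >= n, collect all positive integers
--        from members of L' whose elements sum to a positive number.
--     2. Second list: For each L' in L with length >= n and for each L'' in L'
--        whose elements sum to a positive number, collect all positive integers from L''.
--
--     This implementation uses multiple simple list comprehensions for improved readability.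
--
--     Args:
--         L: A list of lists of lists of integers
--         n: Minimum length requirement for sublists
--
--     Returns:
--         A tuple of two lists of lists of positive integers
--     """
--     # First, filter L to only include sublists with length >= n
--     filtered_L = [L1 for L1 in L if len(L1) >= n]
--
--     # For the first result list:
--     # For each filtered L1, collect positive elements from L2 with positive sum
--     first_list = []
--     for L1 in filtered_L:
--         # Create a list of all positive integers from L2s with positive sum
--         positives = [e for L2 in L1 if sum(L2) > 0
--                        for e in L2 if e > 0]
--         first_list.append(positives)
--
--     # For the second result list:
--     # For each filtered L1 and each L2 with positive sum,
--     # create separate lists of positive elements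
--     second_list = []
--     for L1 in filtered_L:
--         for L2 in L1:
--             if sum(L2) > 0:
--                 # Create a list of all positive integers in this L2
--                 positives = [e for e in L2 if e > 0]
--                 second_list.append(positives)
--
--     return (first_list, second_list)
-- ===== SOURCE B (Python) =====
-- def f3_2(L: list[list[list[int]]], n: int) -> tuple[list[list[int]], list[list[int]]]:
--     # Single pass: for each long-enough L1, walk its sublists once, computing each
--     # sum once; positive-sum groups feed second_list directly and are concatenated
--     # per-L1 for first_list.
--     first_list = []
--     second_list = []
--     for L1 in L:
--         if len(L1) >= n:
--             acc = []
--             for L2 in L1: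
--                 if sum(L2) > 0:
--                     grp = [e for e in L2 if e > 0]
--                     second_list.append(grp)
--                     acc += grp
--             first_list.append(acc)
--     return (first_list, second_list)
-- ===== Notes on version B (the rewrite author's own statement) =====
-- stated objective: alternative
-- what changed: Replaces A's three separate passes (a filter pass plus two independent loops over the filtered list, each re-testing sum(L2)>0) with one fused pass over L that computes each sublist sum once and builds both result lists simultaneously.
import Mathlib
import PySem

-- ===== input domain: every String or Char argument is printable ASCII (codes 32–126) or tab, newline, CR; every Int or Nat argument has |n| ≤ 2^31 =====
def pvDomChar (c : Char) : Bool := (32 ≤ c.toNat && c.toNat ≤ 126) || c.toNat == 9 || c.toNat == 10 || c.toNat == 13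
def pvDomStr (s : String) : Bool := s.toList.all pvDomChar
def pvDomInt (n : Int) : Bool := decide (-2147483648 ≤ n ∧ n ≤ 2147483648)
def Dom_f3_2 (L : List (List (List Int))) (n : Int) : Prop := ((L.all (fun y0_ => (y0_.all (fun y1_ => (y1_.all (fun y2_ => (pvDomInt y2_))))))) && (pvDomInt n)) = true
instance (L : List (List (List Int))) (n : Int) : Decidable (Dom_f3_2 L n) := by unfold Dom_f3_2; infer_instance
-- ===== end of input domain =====

-- B fuses A's three passes (filter, first-list loop, second-list loop) into one
-- pass over L computing each sublist sum once; return values proved equal.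


-- ===== PORT A =====
def f3_2 (L : List (List (List Int))) (n : Int) : List (List Int) × List (List Int) :=
  let filteredL := L.filter (fun L1 => decide (n ≤ (L1.length : Int)))
  let firstList := filteredL.foldl (fun first L1 =>
    let positives := (L1.filter (fun L2 => decide (0 < L2.sum))).flatMap
      (fun L2 => L2.filter (fun e => decide (0 < e)))
    first ++ [positives]) []
  let secondList := filteredL.foldl (fun second L1 =>
    L1.foldl (fun second L2 =>
      if 0 < L2.sum then
        second ++ [L2.filter (fun e => decide (0 < e))]
      else second) second) []
  (firstList, secondList)

-- ===== PORT B =====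
def f3_2_alt (L : List (List (List Int))) (n : Int) : List (List Int) × List (List Int) :=
  L.foldl (fun st L1 =>
    if n ≤ (L1.length : Int) then
      let inner := L1.foldl (fun (p : List Int × List (List Int)) L2 =>
        if 0 < L2.sum then
          let grp := L2.filter (fun e => decide (0 < e))
          (p.1 ++ grp, p.2 ++ [grp])
        else p) ([], st.2)
      (st.1 ++ [inner.1], inner.2)
    else st) ([], [])

-- ===== PRECONDITION & SPEC =====
def Spec_f3_2 (L : List (List (List Int))) (n : Int) (out : List (List Int) × List (List Int)) : Prop := out = f3_2_alt L n
instance (L : List (List (List Int))) (n : Int) (out : List (List Int) × List (List Int)) : Decidable (Spec_f3_2 L n out) := by unfold Spec_f3_2; infer_instance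

-- ===== CLAIM (what is proved, stated in full; the proofs are below) =====
def Claim_equal_f3_2 : Prop := ∀ (L : List (List (List Int))) (n : Int), Dom_f3_2 L n → Spec_f3_2 L n (f3_2 L n)

-- ===== LEMMAS AND PROOFS =====

-- positive entries of a positive-sum sublist, concatenated (first_list entry for L1)
def pvGrpCat (L1 : List (List Int)) : List Int :=
  (L1.filter (fun L2 => decide (0 < L2.sum))).flatMap (fun L2 => L2.filter (fun e => decide (0 < e)))

-- per-group positive entries (second_list contributions of L1)
def pvGrps (L1 : List (List Int)) : List (List Int) :=
  (L1.filter (fun L2 => decide (0 < L2.sum))).map (fun L2 => L2.filter (fun e => decide (0 < e)))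

theorem pv_inner_B (L1 : List (List Int)) (a : List Int) (b : List (List Int)) :
    L1.foldl (fun (p : List Int × List (List Int)) L2 =>
      if 0 < L2.sum then
        (p.1 ++ L2.filter (fun e => decide (0 < e)), p.2 ++ [L2.filter (fun e => decide (0 < e))])
      else p) (a, b) = (a ++ pvGrpCat L1, b ++ pvGrps L1) := by
  induction L1 generalizing a b with
  | nil => simp [pvGrpCat, pvGrps]
  | cons L2 rest ih =>
    by_cases h : 0 < L2.sum <;>
      simp [List.foldl_cons, h, ih, pvGrpCat, pvGrps]

theorem pv_stepB_eq (n : Int) :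
    (fun (st : List (List Int) × List (List Int)) (L1 : List (List Int)) =>
      if n ≤ (L1.length : Int) then
        let inner := L1.foldl (fun (p : List Int × List (List Int)) L2 =>
          if 0 < L2.sum then
            let grp := L2.filter (fun e => decide (0 < e))
            (p.1 ++ grp, p.2 ++ [grp])
          else p) ([], st.2)
        (st.1 ++ [inner.1], inner.2)
      else st) =
    (fun (st : List (List Int) × List (List Int)) (L1 : List (List Int)) =>
      if n ≤ (L1.length : Int) then (st.1 ++ [pvGrpCat L1], st.2 ++ pvGrps L1) else st) := by
  funext st L1
  by_cases h : n ≤ (L1.length : Int) <;> simp [h, pv_inner_B]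

theorem pv_outer_B (L : List (List (List Int))) (n : Int) (a b : List (List Int)) :
    L.foldl (fun (st : List (List Int) × List (List Int)) L1 =>
      if n ≤ (L1.length : Int) then (st.1 ++ [pvGrpCat L1], st.2 ++ pvGrps L1) else st) (a, b) =
    (a ++ (L.filter (fun L1 => decide (n ≤ (L1.length : Int)))).map pvGrpCat,
     b ++ (L.filter (fun L1 => decide (n ≤ (L1.length : Int)))).flatMap pvGrps) := by
  induction L generalizing a b with
  | nil => simp
  | cons L1 rest ih =>
    rw [List.foldl_cons]
    by_cases h : n ≤ (L1.length : Int) <;> simp [h, ih]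

theorem pv_A_second (L1 : List (List Int)) (s : List (List Int)) :
    L1.foldl (fun second L2 =>
      if 0 < L2.sum then
        second ++ [L2.filter (fun e => decide (0 < e))]
      else second) s = s ++ pvGrps L1 := by
  simpa [pvGrps] using
    PySem.List.foldl_append_ite (p := fun L2 : List Int => 0 < L2.sum)
      (f := fun L2 : List Int => L2.filter (fun e => decide (0 < e))) (l := L1) (acc := s)

-- ===== VERDICT (by name: the statement is the Claim_ definition above) =====
theorem f3_2_spec : Claim_equal_f3_2 := by
  intro L n _
  unfold Spec_f3_2 f3_2 f3_2_alt
  rw [pv_stepB_eq, pv_outer_B]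
  simp only [pv_A_second, PySem.List.foldl_append_eq_flatMap,
    PySem.List.foldl_append_singleton_eq_map, List.nil_append]
  have : ∀ (M : List (List (List Int))),
      M.flatMap (fun x => [pvGrpCat x]) = M.map pvGrpCat := by
    intro M; induction M with
    | nil => rfl
    | cons x xs ih => simp [ih]
  exact Prod.ext (this _) rfl
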